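-- pv_equiv track=rewrite | github.com/kur114/lib-mgmt | lib_mgmt/utils/upload_validator.py | book_validate
-- ===== SOURCE A (Python) =====
-- def book_validate(file_data):
--     try:
--         lines = file_data.split("\n")
--         for line in lines:
--             # 检查每一行是否有 7 个字段
--             # 检查字段属性和长度是否符合要求
--             # 不符合返回 (False,reason)
--             fields = line.split(",")
--             if len(fields) != 7:
--                 return (False, "Invalid number of fields")
--             title = fields[0]
--             author = fields[1]
--             publisher = fields[2]
--             publish_date = fields[3]
--             index_number = fields[4]
--             category = fields[5]
--             description = fields[6]
--             if len(title) > 100: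
--                 return (False, "Title too long")
--             if len(author) > 100:
--                 return (False, "Author too long")
--             if len(publisher) > 100:
--                 return (False, "Publisher too long")
--             if len(publish_date) > 100:
--                 return (False, "Publish date too long")
--             if len(index_number) > 50:
--                 return (False, "Index number too long")
--             if len(category) > 100:
--                 return (False, "Category too long")
--             if description is None:
--                 description = ""
--     except Exception as e:
--         return (False, str(e))
--     return (True, "good")
-- ===== SOURCE B (Python) =====
-- _LIMITS = ((100, "Title too long"), (100, "Author too long"),
--            (100, "Publisher too long"), (100, "Publish date too long"),
--            (50, "Index number too long"), (100, "Category too long"))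
--
-- def book_validate(file_data):
--     # single streaming pass over the characters: no split(), no per-line lists of
--     # field strings -- only field LENGTHS are tracked, one line decided per '\n'
--     lens = []   # lengths of the completed fields of the current line
--     cur = 0     # length of the field being read
--     for ch in file_data + "\n":
--         if ch == "\n":
--             lens.append(cur)
--             if len(lens) != 7:
--                 return (False, "Invalid number of fields")
--             for n, (mx, msg) in zip(lens, _LIMITS):
--                 if n > mx:
--                     return (False, msg)
--             lens = []
--             cur = 0
--         elif ch == ",":
--             lens.append(cur)
--             cur = 0
--         else:
--             cur += 1
--     return (True, "good")
-- ===== Notes on version B (the rewrite author's own statement) =====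
-- stated objective: alternative
-- what changed: Replaced the split-into-lines / split-into-fields / unpack-six-variables if-chain with a single character-level streaming state machine that never materialises field strings: it tracks only the current field length and the list of completed field lengths, and decides each line at its newline against a zipped limits table.
import Mathlib
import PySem

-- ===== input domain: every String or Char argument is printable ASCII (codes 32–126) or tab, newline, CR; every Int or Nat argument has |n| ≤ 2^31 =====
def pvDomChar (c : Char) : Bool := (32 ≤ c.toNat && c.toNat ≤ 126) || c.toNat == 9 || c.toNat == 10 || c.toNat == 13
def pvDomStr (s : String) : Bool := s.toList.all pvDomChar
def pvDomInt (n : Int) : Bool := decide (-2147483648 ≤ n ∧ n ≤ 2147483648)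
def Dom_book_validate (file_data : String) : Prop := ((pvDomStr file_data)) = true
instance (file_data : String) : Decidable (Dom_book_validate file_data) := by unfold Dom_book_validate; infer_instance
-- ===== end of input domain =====

-- B replaces A's split-into-lines/split-into-fields/unpacked if-chain by a single
-- character-level streaming state machine tracking only field lengths (objective: alternative).

-- ===== PORT A =====
-- the per-file loop 'for line in lines: …'; returning from inside the loop = the non-recursive branches
def book_validate_goA : List (List Char) → Bool × String
  | [] => (true, "good")
  | line :: rest =>
    let fields := PySem.Chars.splitOn line [',']
    if fields.length ≠ 7 then (false, "Invalid number of fields")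
    else
      let title := fields.getD 0 []
      let author := fields.getD 1 []
      let publisher := fields.getD 2 []
      let publish_date := fields.getD 3 []
      let index_number := fields.getD 4 []
      let category := fields.getD 5 []
      if PySem.Chars.len title > 100 then (false, "Title too long")
      else if PySem.Chars.len author > 100 then (false, "Author too long")
      else if PySem.Chars.len publisher > 100 then (false, "Publisher too long")
      else if PySem.Chars.len publish_date > 100 then (false, "Publish date too long")
      else if PySem.Chars.len index_number > 50 then (false, "Index number too long")
      else if PySem.Chars.len category > 100 then (false, "Category too long")
      else book_validate_goA rest

def book_validate (file_data : String) : Bool × String :=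
  book_validate_goA (PySem.Chars.splitOn file_data.toList ['\n'])

-- ===== PORT B =====
def bvLimits : List (Int × String) :=
  [(100, "Title too long"), (100, "Author too long"), (100, "Publisher too long"),
   (100, "Publish date too long"), (50, "Index number too long"), (100, "Category too long")]

-- the 'for n, (mx, msg) in zip(lens, _LIMITS)' loop; some r = early return
def bvZip : List Nat → List (Int × String) → Option (Bool × String)
  | _, [] => none
  | [], _ :: _ => none
  | n :: ns, (mx, msg) :: rest =>
    if (n : Int) > mx then some (false, msg) else bvZip ns rest

-- the 'for ch in file_data + "\n"' loop; state = (lens, cur)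
def bvGo : List Nat → Nat → List Char → Bool × String
  | _, _, [] => (true, "good")
  | lens, cur, c :: cs =>
    if c = '\n' then
      let lens' := lens ++ [cur]
      if lens'.length ≠ 7 then (false, "Invalid number of fields")
      else
        match bvZip lens' bvLimits with
        | some r => r
        | none => bvGo [] 0 cs
    else if c = ',' then bvGo (lens ++ [cur]) 0 cs
    else bvGo lens (cur + 1) cs

def book_validate_alt (file_data : String) : Bool × String :=
  bvGo [] 0 (file_data.toList ++ ['\n'])

-- ===== PRECONDITION & SPEC =====
def Spec_book_validate (file_data : String) (out : Bool × String) : Prop := out = book_validate_alt file_data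
instance (file_data : String) (out : Bool × String) : Decidable (Spec_book_validate file_data out) := by unfold Spec_book_validate; infer_instance

-- ===== CLAIM (what is proved, stated in full; the proofs are below) =====
def Claim_equal_book_validate : Prop := ∀ (file_data : String), Dom_book_validate file_data → Spec_book_validate file_data (book_validate file_data)

-- ===== LEMMAS AND PROOFS =====

-- single-char-separator split, accumulator in order (proof-side model of PySem.Chars.splitOn)
def split1 (sc : Char) (pre : List Char) : List Char → List (List Char)
  | [] => [pre]
  | c :: r => if c = sc then pre :: split1 sc [] r else split1 sc (pre ++ [c]) r

theorem splitOn_go_eq (sc : Char) :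
    ∀ (fuel : Nat) (l cur : List Char) (acc : List (List Char)), l.length < fuel →
      PySem.Chars.splitOn.go [sc] fuel l cur acc = acc.reverse ++ split1 sc cur.reverse l := by
  intro fuel
  induction fuel with
  | zero => intro l cur acc h; omega
  | succ fuel ih =>
    intro l cur acc h
    cases l with
    | nil => rw [PySem.Chars.splitOn.go.eq_def]; simp [split1]
    | cons c rest =>
      rw [PySem.Chars.splitOn.go.eq_def]
      simp only [List.length_cons] at h
      by_cases hc : c = sc
      · subst hc
        have hpre : [c].isPrefixOf (c :: rest) = true := by
          simp [List.isPrefixOf]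
        simp only [hpre, if_true]
        rw [show List.drop [c].length (c :: rest) = rest by simp]
        rw [ih rest [] (cur.reverse :: acc) (by omega)]
        simp [split1]
      · have hpre2 : [sc].isPrefixOf (c :: rest) = false := by
          simp [List.isPrefixOf]
          exact fun hh => hc hh.symm
        simp only [hpre2, Bool.false_eq_true, if_false]
        rw [ih rest (c :: cur) acc (by omega)]
        simp [split1, hc]

theorem splitOn_eq (sc : Char) (s : List Char) :
    PySem.Chars.splitOn s [sc] = split1 sc [] s := by
  have := splitOn_go_eq sc (s.length + 1) s [] [] (by omega)
  simpa [PySem.Chars.splitOn] using this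

-- split1 recurrences for the line decomposition
theorem split1_no_sep (sc : Char) :
    ∀ (l pre : List Char), sc ∉ l → split1 sc pre l = [pre ++ l] := by
  intro l
  induction l with
  | nil => simp [split1]
  | cons c r ih =>
    intro pre h
    simp only [List.mem_cons, not_or] at h
    have hcs : c ≠ sc := fun hh => h.1 hh.symm
    simp [split1, hcs, ih (pre ++ [c]) h.2]

theorem split1_append (sc : Char) :
    ∀ (l pre rest : List Char), sc ∉ l →
      split1 sc pre (l ++ sc :: rest) = (pre ++ l) :: split1 sc [] rest := by
  intro l
  induction l with
  | nil => simp [split1]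
  | cons c r ih =>
    intro pre rest h
    simp only [List.mem_cons, not_or] at h
    have hcs : c ≠ sc := fun hh => h.1 hh.symm
    simp [split1, hcs, ih (pre ++ [c]) rest h.2]

-- field lengths of a line computed by the scan, starting from a partial first field of length cur
def lenAcc (cur : Nat) : List Char → List Nat
  | [] => [cur]
  | c :: r => if c = ',' then cur :: lenAcc 0 r else lenAcc (cur + 1) r

theorem lenAcc_split : ∀ (l pre : List Char),
    List.map PySem.Chars.len (split1 ',' pre l) = (lenAcc pre.length l).map (fun n => (n : Int)) := by
  intro l
  induction l with
  | nil => simp [split1, lenAcc, PySem.Chars.len]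
  | cons c r ih =>
    intro pre
    by_cases hc : c = ','
    · subst hc
      simp [split1, lenAcc, PySem.Chars.len, ih []]
    · have := ih (pre ++ [c])
      simp only [List.length_append, List.length_cons, List.length_nil, Nat.zero_add] at this
      simp [split1, lenAcc, hc, this]

-- the body of one line decision of bvGo, shared by the newline branch
def lineStep (L : List Nat) (rest : List Char) : Bool × String :=
  if L.length ≠ 7 then (false, "Invalid number of fields")
  else
    match bvZip L bvLimits with
    | some r => r
    | none => bvGo [] 0 rest

theorem bvGo_line : ∀ (l : List Char) (lens : List Nat) (cur : Nat) (rest : List Char),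
    '\n' ∉ l → bvGo lens cur (l ++ '\n' :: rest) = lineStep (lens ++ lenAcc cur l) rest := by
  intro l
  induction l with
  | nil => intro lens cur rest _; simp [bvGo, lenAcc, lineStep]
  | cons c r ih =>
    intro lens cur rest h
    simp only [List.mem_cons, not_or] at h
    by_cases hc : c = ','
    · subst hc
      simp [bvGo, lenAcc, ih (lens ++ [cur]) 0 rest h.2]
    · have hcs : c ≠ '\n' := fun hh => h.1 hh.symm
      simp [bvGo, lenAcc, hcs, hc, ih lens (cur + 1) rest h.2]

-- helper: a list of length 7 is seven conses
theorem exists7 {A : Type} (L : List A) (h : L.length = 7) :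
    ∃ a b c d e f g, L = [a, b, c, d, e, f, g] := by
  rcases L with _|⟨a,_|⟨b,_|⟨c,_|⟨d,_|⟨e,_|⟨f,_|⟨g,L'⟩⟩⟩⟩⟩⟩⟩
  all_goals simp only [List.length_cons, List.length_nil] at h
  all_goals try omega
  cases L' with
  | nil => exact ⟨a, b, c, d, e, f, g, rfl⟩
  | cons x t => simp only [List.length_cons] at h; omega

-- helper: split off the prefix before the first occurrence of c
theorem split_first {c : Char} {chars : List Char} (h : c ∈ chars) :
    ∃ l rest, chars = l ++ c :: rest ∧ c ∉ l := by
  induction chars with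
  | nil => simp at h
  | cons a t ih =>
    by_cases ha : a = c
    · exact ⟨[], t, by rw [ha]; rfl, by simp⟩
    · have hct : c ∈ t := by
        rcases List.mem_cons.mp h with h1 | h2
        · exact absurd h1.symm ha
        · exact h2
      obtain ⟨l, rest, h1, h2⟩ := ih hct
      have hca : c ≠ a := fun hh => ha hh.symm
      exact ⟨a :: l, rest, by rw [h1]; rfl, by simp [h2, hca]⟩

-- one line's checks of A equal one lineStep of B, given equal continuations
theorem line_eq (line : List Char) (rest : List (List Char)) (rc : List Char)
    (hnext : book_validate_goA rest = bvGo [] 0 rc) :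
    book_validate_goA (line :: rest) = lineStep (lenAcc 0 line) rc := by
  have hm : List.map PySem.Chars.len (PySem.Chars.splitOn line [','])
      = (lenAcc 0 line).map (fun n => (n : Int)) := by
    have := lenAcc_split line []
    rw [← splitOn_eq] at this
    simpa only [List.length_nil] using this
  have hlen : (PySem.Chars.splitOn line [',']).length = (lenAcc 0 line).length := by
    have := congrArg List.length hm; simpa using this
  by_cases h7 : (lenAcc 0 line).length = 7
  · obtain ⟨f0, f1, f2, f3, f4, f5, f6, hF⟩ := exists7 _ (hlen.trans h7)
    obtain ⟨n0, n1, n2, n3, n4, n5, n6, hN⟩ := exists7 _ h7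
    rw [hF, hN] at hm
    simp at hm
    obtain ⟨e0, e1, e2, e3, e4, e5, e6⟩ := hm
    subst e0 e1 e2 e3 e4 e5 e6
    simp only [book_validate_goA, hF, hN, lineStep, bvZip, bvLimits, hnext,
      List.getD_cons_zero, List.getD_cons_succ, List.length_cons, List.length_nil,
      PySem.Chars.len]
    norm_num
    split_ifs <;> rfl
  · have h7' : (PySem.Chars.splitOn line [',']).length ≠ 7 := by omega
    simp [book_validate_goA, lineStep, h7, h7']

theorem bv_main : ∀ (chars : List Char),
    bvGo [] 0 (chars ++ ['\n']) = book_validate_goA (PySem.Chars.splitOn chars ['\n']) := by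
  intro chars
  induction hn : chars.length using Nat.strong_induction_on generalizing chars with
  | _ n ih =>
  by_cases h : '\n' ∈ chars
  · obtain ⟨l, rest, hchars, hnl⟩ := split_first h
    have hlt : rest.length < n := by
      rw [← hn, hchars]; simp only [List.length_append, List.length_cons]; omega
    have hIH := ih rest.length hlt rest rfl
    have h1 : bvGo [] 0 (chars ++ ['\n']) = lineStep (lenAcc 0 l) (rest ++ ['\n']) := by
      rw [hchars, show (l ++ '\n' :: rest) ++ ['\n'] = l ++ '\n' :: (rest ++ ['\n']) by simp]
      simpa using bvGo_line l [] 0 (rest ++ ['\n']) hnl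
    have h2 : PySem.Chars.splitOn chars ['\n'] = l :: PySem.Chars.splitOn rest ['\n'] := by
      rw [hchars, splitOn_eq, split1_append '\n' l [] rest hnl, ← splitOn_eq]; simp
    rw [h1, h2]
    exact (line_eq l (PySem.Chars.splitOn rest ['\n']) (rest ++ ['\n']) hIH.symm).symm
  · have h1 : bvGo [] 0 (chars ++ ['\n']) = lineStep (lenAcc 0 chars) [] := by
      simpa using bvGo_line chars [] 0 [] h
    rw [h1, splitOn_eq, split1_no_sep '\n' chars [] h]
    exact (line_eq chars [] [] rfl).symm

-- ===== VERDICT (by name: the statement is the Claim_ definition above) =====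
theorem book_validate_spec : Claim_equal_book_validate := by
  intro fd _
  unfold Spec_book_validate book_validate book_validate_alt
  exact (bv_main fd.toList).symm
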